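-- pv_equiv track=rewrite | github.com/filip-husnik/pseudofinder | modules/breaker.py | RemoveLeadingSpaces
-- ===== SOURCE A (Python) =====
-- def RemoveLeadingSpaces(line):
--     counter = 0
--     newLine = ''
--     for i in line:
--         if i == " ":
--             if counter == 0:
--                 pass
--             else:
--                 newLine += i
--         else:
--             counter += 1
--             newLine += i
--     return newLine
-- ===== SOURCE B (Python) =====
-- def RemoveLeadingSpaces(line):
--     i = 0
--     while i < len(line) and line[i] == ' ':
--         i += 1
--     return line[i:]
-- ===== Notes on version B (the rewrite author's own statement) =====
-- stated objective: faster
-- what changed: B finds the boundary index of the leading run of spaces with a while loop and returns one slice, instead of A's per-character rebuild of the whole string with a counter flag.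
import Mathlib
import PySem

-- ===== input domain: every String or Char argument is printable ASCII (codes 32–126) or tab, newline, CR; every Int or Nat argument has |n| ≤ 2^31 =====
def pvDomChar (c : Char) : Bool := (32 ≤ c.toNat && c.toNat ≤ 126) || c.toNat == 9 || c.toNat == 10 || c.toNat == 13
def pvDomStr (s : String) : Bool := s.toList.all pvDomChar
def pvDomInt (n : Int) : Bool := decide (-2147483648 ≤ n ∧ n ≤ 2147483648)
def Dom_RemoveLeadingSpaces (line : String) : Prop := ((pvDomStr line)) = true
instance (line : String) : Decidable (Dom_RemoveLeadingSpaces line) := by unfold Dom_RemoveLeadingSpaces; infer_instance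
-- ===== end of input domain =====

-- B computes the boundary of the leading space run and returns one slice, instead of A's per-character rebuild with a counter flag; same return value everywhere.
-- ===== PORT A =====
-- for i in line: update (counter, newLine) per A's branches
def loopA : List Char → Int → List Char → List Char
  | [], _, acc => acc
  | c :: rest, counter, acc =>
    if c = ' ' then
      if counter = 0 then loopA rest counter acc
      else loopA rest counter (acc ++ [c])
    else loopA rest (counter + 1) (acc ++ [c])

def RemoveLeadingSpaces (line : String) : String :=
  String.mk (loopA line.toList 0 [])

-- ===== PORT B =====
-- the while loop 'i = 0; while i < len(line) and line[i] == ' ': i += 1' as structural recursion; 'line[i:]' is the remaining suffix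
def skipB : List Char → List Char
  | [] => []
  | c :: rest => if c = ' ' then skipB rest else c :: rest

def RemoveLeadingSpaces_alt (line : String) : String :=
  String.mk (skipB line.toList)

-- ===== PRECONDITION & SPEC =====
def Spec_RemoveLeadingSpaces (line : String) (out : String) : Prop := out = RemoveLeadingSpaces_alt line
instance (line : String) (out : String) : Decidable (Spec_RemoveLeadingSpaces line out) := by unfold Spec_RemoveLeadingSpaces; infer_instance

-- ===== CLAIM (what is proved, stated in full; the proofs are below) =====
def Claim_equal_RemoveLeadingSpaces : Prop := ∀ (line : String), Dom_RemoveLeadingSpaces line → Spec_RemoveLeadingSpaces line (RemoveLeadingSpaces line)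

-- ===== LEMMAS AND PROOFS =====

-- ===== VERDICT (by name: the statement is the Claim_ definition above) =====
-- once counter ≥ 1, A's loop copies every remaining character
theorem loopA_pos (l : List Char) : ∀ (k : Int) (acc : List Char), 1 ≤ k →
    loopA l k acc = acc ++ l := by
  induction l with
  | nil => intro k acc _; simp [loopA]
  | cons c rest ih =>
    intro k acc hk
    by_cases hc : c = ' '
    · have hk0 : ¬ k = 0 := by omega
      rw [show loopA (c :: rest) k acc = loopA rest k (acc ++ [c]) by
            simp [loopA, hc, hk0], ih k (acc ++ [c]) hk]
      simp
    · simp [loopA, hc, ih (k + 1) (acc ++ [c]) (by omega)]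

theorem loopA_zero (l : List Char) : ∀ (acc : List Char),
    loopA l 0 acc = acc ++ skipB l := by
  induction l with
  | nil => intro acc; simp [loopA, skipB]
  | cons c rest ih =>
    intro acc
    by_cases hc : c = ' '
    · simp [loopA, skipB, hc, ih]
    · simp [loopA, skipB, hc, loopA_pos rest 1 (acc ++ [c]) (by omega)]

-- ===== VERDICT (by name: the statement is the Claim_ definition above) =====
theorem RemoveLeadingSpaces_spec : Claim_equal_RemoveLeadingSpaces := by
  intro line _
  show String.mk (loopA line.toList 0 []) = String.mk (skipB line.toList)
  rw [loopA_zero, List.nil_append]
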